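-- pv_equiv track=rewrite | github.com/ppfaff/PhysicalQuantities | PQ_math_reorg.py | combine_repeat_unit_as_power
-- ===== SOURCE A (Python) =====
-- def combine_repeat_unit_as_power(unit_list):
--     """ Helper function that returns the unit list with units that are
--     multiplied together as a power of the unit. So, ['m', 'm'] is converted
--     to ['m2'].  This is primarily used for formatting for outputs
--     """
--     temp_unit_list = []
--     if unit_list:
--         # slicing creates a new unlinked verion of the input unit_list
--         temp_unit_list = unit_list[:]
--         for unit in unit_list:
--             # count the occurances of a unit in the temp_unit_list and if
--             # count is greater than 1, remove these units and replace with
--             # the power version.  Note, the for loop cycles on the original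
--             # unit list to avoid indexing problems created by looping on
--             # a list that is having elements added and removed
--             cnt = temp_unit_list.count(unit)
--             if cnt > 1:
--                 for i in range(cnt):
--                     temp_unit_list.remove(unit)
--                 temp_unit_list.append(unit + str(cnt))
--     return temp_unit_list
-- ===== SOURCE B (Python) =====
-- def combine_repeat_unit_as_power(unit_list):
--     """One pass with a frequency table: singletons keep their positions,
--     repeated units are appended once as power forms in first-appearance order."""
--     counts = {}
--     for u in unit_list:
--         counts[u] = counts.get(u, 0) + 1
--     result = [u for u in unit_list if counts[u] == 1]
--     seen = set()
--     for u in unit_list: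
--         if counts[u] > 1 and u not in seen:
--             seen.add(u)
--             result.append(u + str(counts[u]))
--     return result
-- ===== Notes on version B (the rewrite author's own statement) =====
-- stated objective: faster
-- what changed: Replaced A's repeated count/remove rescans of a mutated copy by one frequency-table pass: singletons are kept in place by a filter and each repeated unit is appended once as its power form in first-appearance order, guarded by a seen-set.
-- outside the precondition, e.g. on combine_repeat_unit_as_power(['m', 'm', 'm2']): A returns ['m22'], B returns ['m2', 'm2']; on combine_repeat_unit_as_power(['m', 'm', 'm2', 'm2']): A returns ['m23'], B returns ['m2', 'm22']
import Mathlib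
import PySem

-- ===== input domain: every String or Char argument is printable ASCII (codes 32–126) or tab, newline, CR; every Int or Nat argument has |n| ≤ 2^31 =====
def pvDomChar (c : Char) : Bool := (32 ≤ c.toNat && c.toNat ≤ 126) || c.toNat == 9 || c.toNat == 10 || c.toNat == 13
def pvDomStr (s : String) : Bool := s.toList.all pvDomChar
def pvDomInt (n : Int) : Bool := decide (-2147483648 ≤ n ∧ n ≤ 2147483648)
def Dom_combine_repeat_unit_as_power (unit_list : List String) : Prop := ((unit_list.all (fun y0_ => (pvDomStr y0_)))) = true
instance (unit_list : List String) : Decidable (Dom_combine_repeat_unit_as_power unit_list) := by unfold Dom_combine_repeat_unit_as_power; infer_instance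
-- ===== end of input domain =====

-- B replaces A's quadratic count/remove rescanning by a frequency table and a single
-- seen-set pass (objective: faster, O(n^2) → O(n) hash-model time).

-- ===== PORT A =====
-- loop body of A's 'for unit in unit_list' (cnt = temp.count(unit); remove cnt times; append power)
def pvStepA (temp : List String) (unit : String) : List String :=
  let cnt := PySem.List.count temp unit
  if 1 < cnt then
    (PySem.List.pyRange 0 (cnt : Int) 1).foldl
      (fun t _ => (PySem.List.remove? t unit).getD t) temp
      ++ [unit ++ PySem.Int.toStr (cnt : Int)]
  else temp

def combine_repeat_unit_as_power (unit_list : List String) : List String :=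
  if unit_list.isEmpty then []
  else unit_list.foldl pvStepA (PySem.List.slice unit_list none none)

-- ===== PORT B =====
def combine_repeat_unit_as_power_alt (unit_list : List String) : List String :=
  let counts : PySem.Dict String Int :=
    unit_list.foldl (fun d u => d.insert u (d.getD u 0 + 1)) PySem.Dict.empty
  let result := unit_list.filter (fun u => counts.getD u 0 == 1)
  (unit_list.foldl
    (fun st u =>
      if 1 < counts.getD u 0 && !(PySem.Set.contains st.1 u) then
        (PySem.Set.add st.1 u, st.2 ++ [u ++ PySem.Int.toStr (counts.getD u 0)])
      else st)
    ((PySem.Set.empty : PySem.Set String), result)).2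

-- ===== PRECONDITION & SPEC =====
-- Pre_ excludes lists in which a formed power name u+str(count(u)) already occurs as an
-- element, on which A's cascading remove/recount collapse (e.g. ['m','m','m2'] -> ['m22'])
-- is an accident of rescanning the mutated list; both behaviours there are arbitrary.
def Pre_combine_repeat_unit_as_power (unit_list : List String) : Prop :=
  ∀ u ∈ unit_list, 1 < List.count u unit_list →
    (u ++ PySem.Int.toStr ((List.count u unit_list : Nat) : Int)) ∉ unit_list
instance (unit_list : List String) : Decidable (Pre_combine_repeat_unit_as_power unit_list) := by
  unfold Pre_combine_repeat_unit_as_power; infer_instance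

def pvWitness_combine_repeat_unit_as_power : List String := ["m", "m", "kg", "s", "s", "s"]

def Spec_combine_repeat_unit_as_power (unit_list : List String) (out : List String) : Prop := out = combine_repeat_unit_as_power_alt unit_list
instance (unit_list : List String) (out : List String) : Decidable (Spec_combine_repeat_unit_as_power unit_list out) := by unfold Spec_combine_repeat_unit_as_power; infer_instance

-- ===== CLAIM (what is proved, stated in full; the proofs are below) =====
def Claim_equal_combine_repeat_unit_as_power : Prop := ∀ (unit_list : List String), Dom_combine_repeat_unit_as_power unit_list → Pre_combine_repeat_unit_as_power unit_list → Spec_combine_repeat_unit_as_power unit_list (combine_repeat_unit_as_power unit_list)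

-- ===== LEMMAS AND PROOFS =====

-- count-based version of B's second-loop body (the dict lookup is the full-list count)
def pvStepB (L : List String) (st : PySem.Set String × List String) (u : String) :
    PySem.Set String × List String :=
  if 1 < ((List.count u L : Nat) : Int) && !(PySem.Set.contains st.1 u) then
    (PySem.Set.add st.1 u, st.2 ++ [u ++ PySem.Int.toStr ((List.count u L : Nat) : Int)])
  else st

-- removing an element as many times as it occurs filters it out
lemma pvFilterErase (T : List String) (u : String) :
    (T.erase u).filter (fun x => !(x == u)) = T.filter (fun x => !(x == u)) := by
  induction T with
  | nil => simp
  | cons a t ih =>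
    by_cases hau : a = u
    · subst hau; simp [List.erase_cons_head]
    · rw [List.erase_cons_tail (by simp [hau])]
      simp only [List.filter_cons, ih]

lemma pvRemoveIter (l : List Int) : ∀ (T : List String) (u : String),
    List.count u T = l.length →
    l.foldl (fun t _ => (PySem.List.remove? t u).getD t) T
      = T.filter (fun x => !(x == u)) := by
  induction l with
  | nil =>
    intro T u h
    simp only [List.length_nil, List.count_eq_zero] at h
    simp only [List.foldl_nil]
    exact (List.filter_eq_self.mpr (by intro a ha; simp; rintro rfl; exact h ha)).symm
  | cons a t ih =>
    intro T u h
    have hmem : u ∈ T := by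
      rw [← List.count_pos_iff, h]; simp
    simp only [List.foldl_cons, PySem.List.remove?_eq_some_erase T u hmem, Option.getD_some]
    rw [ih (T.erase u) u (by rw [List.count_erase_self]; simp at h; omega)]
    exact pvFilterErase T u

-- the two loops, related step by step
lemma pvLoopEq (L : List String)
    (hPre : ∀ u ∈ L, 1 < List.count u L →
      (u ++ PySem.Int.toStr ((List.count u L : Nat) : Int)) ∉ L) :
    ∀ (s p Q S : List String), L = p ++ s →
    (∀ x, x ∈ S ↔ x ∈ p ∧ 1 < List.count x L) →
    (∀ q ∈ Q, q ∉ L) →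
    s.foldl pvStepA
        (L.filter (fun x => List.count x L == 1 || !(decide (x ∈ p))) ++ Q)
      = (s.foldl (pvStepB L) ((S : PySem.Set String),
          L.filter (fun x => List.count x L == 1) ++ Q)).2 := by
  intro s
  induction s with
  | nil =>
    intro p Q S hL hS hQ
    simp only [List.foldl_nil]
    congr 1
    apply List.filter_congr
    intro x hx
    have hxp : x ∈ p := by rw [hL, List.append_nil] at hx; exact hx
    simp [hxp]
  | cons u s' ih =>
    intro p Q S hL hS hQ
    have huL : u ∈ L := by rw [hL]; simp
    have hcpos : 0 < List.count u L := List.count_pos_iff.mpr huL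
    have hQu : u ∉ Q := fun h => hQ u h huL
    have hcQ : List.count u Q = 0 := List.count_eq_zero.mpr hQu
    simp only [List.foldl_cons]
    by_cases h1 : 1 < List.count u L
    · by_cases hup : u ∈ p
      · -- u already collapsed: both steps do nothing
        have huS : u ∈ S := (hS u).mpr ⟨hup, h1⟩
        have hpredu : (List.count u L == 1 || !(decide (u ∈ p))) = false := by
          simp [hup]; omega
        have hnotmem : u ∉ L.filter (fun x => List.count x L == 1 || !(decide (x ∈ p))) := by
          intro hm
          rw [List.mem_filter, hpredu] at hm
          exact absurd hm.2 (by simp)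
        have hcT : List.count u
            (L.filter (fun x => List.count x L == 1 || !(decide (x ∈ p))) ++ Q) = 0 := by
          rw [List.count_append, hcQ, List.count_eq_zero.mpr hnotmem]
        have hA : pvStepA
            (L.filter (fun x => List.count x L == 1 || !(decide (x ∈ p))) ++ Q) u
            = L.filter (fun x => List.count x L == 1 || !(decide (x ∈ p))) ++ Q := by
          simp [pvStepA, PySem.List.count_eq, hcT]
        have hB : pvStepB L ((S : PySem.Set String),
            L.filter (fun x => List.count x L == 1) ++ Q) u
            = ((S : PySem.Set String), L.filter (fun x => List.count x L == 1) ++ Q) := by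
          simp [pvStepB, PySem.Set.contains, huS]
        rw [hA, hB]
        have hfilt : L.filter (fun x => List.count x L == 1 || !(decide (x ∈ p)))
            = L.filter (fun x => List.count x L == 1 || !(decide (x ∈ p ++ [u]))) := by
          apply List.filter_congr
          intro x hx
          by_cases hxu : x = u
          · subst hxu; simp [hup]
          · simp [List.mem_append, hxu]
        rw [hfilt]
        apply ih (p ++ [u]) Q S
        · rw [hL]; simp
        · intro x
          rw [hS x]
          constructor
          · rintro ⟨hxp, hx1⟩; exact ⟨by simp [hxp], hx1⟩
          · rintro ⟨hxp, hx1⟩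
            rcases List.mem_append.mp hxp with h | h
            · exact ⟨h, hx1⟩
            · simp at h; subst h; exact ⟨hup, hx1⟩
        · exact hQ
      · -- first occurrence of a repeated unit: collapse / append the power form
        have huS : u ∉ S := fun h => hup ((hS u).mp h).1
        have hpredu : (List.count u L == 1 || !(decide (u ∈ p))) = true := by
          simp [hup]
        have hcT : List.count u
            (L.filter (fun x => List.count x L == 1 || !(decide (x ∈ p))) ++ Q)
            = List.count u L := by
          have hcf := List.count_filter (l := L) (a := u)
            (p := fun x => (List.count x L == 1 || !(decide (x ∈ p)))) hpredu
          rw [List.count_append, hcQ, hcf]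
          omega
        have hA : pvStepA
            (L.filter (fun x => List.count x L == 1 || !(decide (x ∈ p))) ++ Q) u
            = L.filter (fun x => List.count x L == 1 || !(decide (x ∈ p ++ [u])))
              ++ (Q ++ [u ++ PySem.Int.toStr ((List.count u L : Nat) : Int)]) := by
          simp only [pvStepA, PySem.List.count_eq, hcT, if_pos h1]
          rw [pvRemoveIter _ _ _ (by rw [hcT]; simp [pysem])]
          rw [List.filter_append]
          have hQf : Q.filter (fun x => !(x == u)) = Q := by
            apply List.filter_eq_self.mpr
            intro a ha
            simp
            rintro rfl
            exact hQ a ha huL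
          rw [hQf, List.filter_filter, List.append_assoc]
          congr 1
          apply List.filter_congr
          intro x hx
          by_cases hxu : x = u
          · subst hxu; simp; omega
          · simp [List.mem_append, hxu]
        have hB : pvStepB L ((S : PySem.Set String),
            L.filter (fun x => List.count x L == 1) ++ Q) u
            = ((S ++ [u] : PySem.Set String),
               L.filter (fun x => List.count x L == 1)
                 ++ (Q ++ [u ++ PySem.Int.toStr ((List.count u L : Nat) : Int)])) := by
          simp only [pvStepB]
          rw [if_pos (by simp [PySem.Set.contains, huS, h1])]
          rw [PySem.Set.add_of_not_mem huS, List.append_assoc]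
        rw [hA, hB]
        apply ih (p ++ [u]) (Q ++ [u ++ PySem.Int.toStr ((List.count u L : Nat) : Int)]) (S ++ [u])
        · rw [hL]; simp
        · intro x
          by_cases hxu : x = u
          · subst hxu; simp [h1]
          · simp only [List.mem_append, List.mem_singleton, hxu, or_false]
            rw [hS x]
        · intro q hq
          rcases List.mem_append.mp hq with h | h
          · exact hQ q h
          · simp at h; subst h
            exact hPre u huL h1
    · -- count 1: nothing to do on either side
      have hc1 : List.count u L = 1 := by omega
      have hcT : List.count u
          (L.filter (fun x => List.count x L == 1 || !(decide (x ∈ p))) ++ Q) ≤ 1 := by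
        have hcf := List.count_filter (l := L) (a := u)
          (p := fun x => (List.count x L == 1 || !(decide (x ∈ p)))) (by simp [hc1])
        rw [List.count_append, hcQ, hcf]
        omega
      have hA : pvStepA
          (L.filter (fun x => List.count x L == 1 || !(decide (x ∈ p))) ++ Q) u
          = L.filter (fun x => List.count x L == 1 || !(decide (x ∈ p))) ++ Q := by
        simp only [pvStepA, PySem.List.count_eq]
        rw [if_neg (by omega)]
      have hB : pvStepB L ((S : PySem.Set String),
          L.filter (fun x => List.count x L == 1) ++ Q) u
          = ((S : PySem.Set String), L.filter (fun x => List.count x L == 1) ++ Q) := by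
        simp [pvStepB, hc1]
      rw [hA, hB]
      have hfilt : L.filter (fun x => List.count x L == 1 || !(decide (x ∈ p)))
          = L.filter (fun x => List.count x L == 1 || !(decide (x ∈ p ++ [u]))) := by
        apply List.filter_congr
        intro x hx
        by_cases hxu : x = u
        · subst hxu; simp [hc1]
        · simp [List.mem_append, hxu]
      rw [hfilt]
      apply ih (p ++ [u]) Q S
      · rw [hL]; simp
      · intro x
        by_cases hxu : x = u
        · subst hxu
          constructor
          · intro h; exact absurd ((hS _).mp h).2 h1
          · rintro ⟨-, h⟩; exact absurd h h1
        · simp only [List.mem_append, List.mem_singleton, hxu, or_false]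
          exact hS x
      · exact hQ

lemma pvAltEq (L : List String) :
    combine_repeat_unit_as_power_alt L
      = (L.foldl (pvStepB L) (([] : PySem.Set String),
          L.filter (fun x => List.count x L == 1))).2 := by
  have hcounts : ∀ u : String,
      (L.foldl (fun d u => d.insert u (d.getD u 0 + 1))
        (PySem.Dict.empty : PySem.Dict String Int)).getD u 0
        = ((List.count u L : Nat) : Int) := by
    intro u; rw [PySem.Dict.getD_foldl_insert_add_one]; simp [pysem]
  simp only [combine_repeat_unit_as_power_alt]
  have hstep : (fun (st : PySem.Set String × List String) (u : String) =>
      if 1 < (L.foldl (fun d u => d.insert u (d.getD u 0 + 1))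
            (PySem.Dict.empty : PySem.Dict String Int)).getD u 0
          && !(PySem.Set.contains st.1 u) then
        (PySem.Set.add st.1 u,
         st.2 ++ [u ++ PySem.Int.toStr
           ((L.foldl (fun d u => d.insert u (d.getD u 0 + 1))
              (PySem.Dict.empty : PySem.Dict String Int)).getD u 0)])
      else st) = pvStepB L := by
    funext st u
    simp only [pvStepB, hcounts]
  have hfilt : L.filter (fun u =>
      (L.foldl (fun d u => d.insert u (d.getD u 0 + 1))
        (PySem.Dict.empty : PySem.Dict String Int)).getD u 0 == 1)
      = L.filter (fun x => List.count x L == 1) := by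
    apply List.filter_congr
    intro x _
    rw [hcounts]
    by_cases h : List.count x L = 1 <;> simp [h]
  rw [hstep, hfilt]
  rfl

-- ===== VERDICT (by name: the statement is the Claim_ definition above) =====
theorem combine_repeat_unit_as_power_spec : Claim_equal_combine_repeat_unit_as_power := by
  intro L _hDom hPre
  unfold Spec_combine_repeat_unit_as_power
  by_cases hL : L = []
  · subst hL; rfl
  · rw [pvAltEq]
    unfold combine_repeat_unit_as_power
    rw [if_neg (by simpa using hL), PySem.List.slice_none_none]
    have h0 : L = L.filter (fun x => List.count x L == 1 || !(decide (x ∈ ([] : List String)))) ++ [] := by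
      simp
    have hmain := pvLoopEq L hPre L [] [] [] (by simp) (by simp) (by simp)
    rw [← h0] at hmain
    simpa using hmain
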